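-- pv_equiv track=rewrite | github.com/icrphysics/RSStaticCodeChecker | RSStaticCodeChecker/static_code_checker/generated/argument_change_1648.py | argumentsRight
-- ===== SOURCE A (Python) =====
-- def argumentsRight(d):
--     args = ["PlanName","NewBeamSetName"]
--     too_many = []
--     for keyword in d.get("keywords", []):
--         if keyword.get("arg") in args:
--             args.remove(keyword.get("arg"))
--         else:
--             too_many.append(keyword.get("arg"))
--     if not too_many and not args:
--         return True
--     return (0 if too_many else 3)
-- ===== SOURCE B (Python) =====
-- def argumentsRight(d):
--     seen = [kw.get("arg") for kw in d.get("keywords", [])]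
--     plan = seen.count("PlanName")
--     beam = seen.count("NewBeamSetName")
--     too_many = len(seen) - plan - beam > 0 or plan > 1 or beam > 1
--     all_matched = plan >= 1 and beam >= 1
--     if not too_many and all_matched:
--         return True
--     return 0 if too_many else 3
-- ===== Notes on version B (the rewrite author's own statement) =====
-- stated objective: simpler
-- what changed: Replaces the stateful loop that shrinks a remaining-args list and accumulates an extras list with a stateless formulation: count occurrences of the two expected names, derive too_many/all_matched from the three counts by arithmetic.
import Mathlib
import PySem

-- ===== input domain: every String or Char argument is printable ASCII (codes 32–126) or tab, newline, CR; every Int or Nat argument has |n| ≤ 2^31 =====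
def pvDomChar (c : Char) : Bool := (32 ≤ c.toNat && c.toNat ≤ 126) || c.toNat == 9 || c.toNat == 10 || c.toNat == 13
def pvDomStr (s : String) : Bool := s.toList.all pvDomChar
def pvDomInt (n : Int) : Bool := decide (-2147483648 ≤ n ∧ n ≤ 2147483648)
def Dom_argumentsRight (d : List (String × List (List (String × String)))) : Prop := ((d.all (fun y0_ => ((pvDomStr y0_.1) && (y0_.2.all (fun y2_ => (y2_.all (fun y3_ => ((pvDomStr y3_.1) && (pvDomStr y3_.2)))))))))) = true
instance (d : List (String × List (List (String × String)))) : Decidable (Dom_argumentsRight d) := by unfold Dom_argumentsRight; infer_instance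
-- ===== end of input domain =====

-- B replaces A's stateful shrinking-args/extras loop by a stateless count-based formulation (same O(n) cost; objective: simpler).


-- ===== PORT A =====
-- the for-loop over d.get("keywords", []), carrying the shrinking `args` list and the `too_many` accumulator
def pvLoopA : List (List (String × String)) → List String → List (Option String) → (List String × List (Option String))
  | [], args, tooMany => (args, tooMany)
  | kw :: rest, args, tooMany =>
    match PySem.Dict.get? ⟨kw⟩ "arg" with
    | some s =>
      if s ∈ args then
        pvLoopA rest ((PySem.List.remove? args s).getD args) tooMany
      else
        pvLoopA rest args (tooMany ++ [some s])
    | none => pvLoopA rest args (tooMany ++ [none])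

def argumentsRight (d : List (String × List (List (String × String)))) : Int :=
  let r := pvLoopA (PySem.Dict.getD ⟨d⟩ "keywords" []) ["PlanName", "NewBeamSetName"] []
  if r.2 = [] ∧ r.1 = [] then 1
  else if ¬ (r.2 = []) then 0 else 3

-- ===== PORT B =====
def argumentsRight_alt (d : List (String × List (List (String × String)))) : Int :=
  let seen := (PySem.Dict.getD ⟨d⟩ "keywords" []).map (fun kw => PySem.Dict.get? ⟨kw⟩ "arg")
  let plan := PySem.List.count seen (some "PlanName")
  let beam := PySem.List.count seen (some "NewBeamSetName")
  let tooMany := (seen.length : Int) - plan - beam > 0 ∨ plan > 1 ∨ beam > 1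
  let allMatched := plan ≥ 1 ∧ beam ≥ 1
  if ¬ tooMany ∧ allMatched then 1
  else if tooMany then 0 else 3

-- ===== PRECONDITION & SPEC =====
def Spec_argumentsRight (d : List (String × List (List (String × String)))) (out : Int) : Prop := out = argumentsRight_alt d
instance (d : List (String × List (List (String × String)))) (out : Int) : Decidable (Spec_argumentsRight d out) := by unfold Spec_argumentsRight; infer_instance

-- ===== CLAIM (what is proved, stated in full; the proofs are below) =====
def Claim_equal_argumentsRight : Prop := ∀ (d : List (String × List (List (String × String)))), Dom_argumentsRight d → Spec_argumentsRight d (argumentsRight d)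

-- ===== LEMMAS AND PROOFS =====

-- pvLoopA over the keyword dicts equals the same loop over the list of looked-up "arg" values
def pvRun : List (Option String) → List String → List (Option String) → (List String × List (Option String))
  | [], args, tooMany => (args, tooMany)
  | x :: rest, args, tooMany =>
    match x with
    | some s =>
      if s ∈ args then
        pvRun rest ((PySem.List.remove? args s).getD args) tooMany
      else
        pvRun rest args (tooMany ++ [some s])
    | none => pvRun rest args (tooMany ++ [none])

theorem pvLoopA_eq_run (kws : List (List (String × String))) (args : List String) (tm : List (Option String)) :
    pvLoopA kws args tm = pvRun (kws.map (fun kw => PySem.Dict.get? ⟨kw⟩ "arg")) args tm := by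
  induction kws generalizing args tm with
  | nil => rfl
  | cons kw rest ih =>
    simp only [List.map_cons, pvLoopA, pvRun]
    cases PySem.Dict.get? (⟨kw⟩ : PySem.Dict String String) "arg" with
    | none => exact ih _ _
    | some s => by_cases hs : s ∈ args <;> simp [hs, ih]

-- a name survives in `args` iff it never occurs among the seen values
theorem pvRun_fst (xs : List (Option String)) (args : List String) (tm : List (Option String))
    (h : args.Nodup) :
    (pvRun xs args tm).1 = args.filter (fun a => decide ((some a) ∉ xs)) := by
  induction xs generalizing args tm with
  | nil => simp [pvRun]
  | cons x rest ih =>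
    cases x with
    | none =>
      simp only [pvRun]
      rw [ih args _ h]
      apply List.filter_congr
      intro a _
      simp
    | some s =>
      by_cases hs : s ∈ args
      · simp only [pvRun]
        rw [if_pos hs, PySem.List.remove?_eq_some_erase args s hs, Option.getD_some]
        rw [ih _ _ (h.erase s)]
        rw [List.Nodup.erase_eq_filter h s, List.filter_filter]
        apply List.filter_congr
        intro a _
        by_cases has : a = s <;> simp [has]
      · simp only [pvRun]
        rw [if_neg hs]
        rw [ih args _ h]
        apply List.filter_congr
        intro a ha
        have : a ≠ s := fun e => hs (e ▸ ha)
        simp [this]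

-- each step either removes one element from `args` or appends one to `tooMany`
theorem pvRun_len (xs : List (Option String)) (args : List String) (tm : List (Option String)) :
    ((pvRun xs args tm).2.length : Int) - ((pvRun xs args tm).1.length : Int)
      = (tm.length : Int) - (args.length : Int) + (xs.length : Int) := by
  induction xs generalizing args tm with
  | nil => simp [pvRun]
  | cons x rest ih =>
    cases x with
    | none =>
      simp only [pvRun]
      rw [ih]
      simp
      omega
    | some s =>
      by_cases hs : s ∈ args
      · simp only [pvRun]
        rw [if_pos hs, PySem.List.remove?_eq_some_erase args s hs, Option.getD_some, ih]
        have h1 : (args.erase s).length = args.length - 1 := List.length_erase_of_mem hs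
        have h2 : 1 ≤ args.length := List.length_pos_of_mem hs
        simp [h1]
        omega
      · simp only [pvRun]
        rw [if_neg hs, ih]
        simp
        omega

theorem two_count_le (xs : List (Option String)) :
    List.count (some "PlanName") xs + List.count (some "NewBeamSetName") xs ≤ xs.length := by
  induction xs with
  | nil => simp
  | cons x rest ih =>
    by_cases h1 : x = some "PlanName"
    · subst h1; simp; omega
    · by_cases h2 : x = some "NewBeamSetName"
      · subst h2; simp; omega
      · simp [h1, h2]; omega

-- ===== VERDICT (by name: the statement is the Claim_ definition above) =====
theorem argumentsRight_spec : Claim_equal_argumentsRight := by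
  intro d _
  unfold Spec_argumentsRight argumentsRight argumentsRight_alt
  dsimp only
  rw [pvLoopA_eq_run, PySem.List.count_eq, PySem.List.count_eq]
  set xs := (PySem.Dict.getD (⟨d⟩ : PySem.Dict String (List (List (String × String)))) "keywords" []).map
      (fun kw => PySem.Dict.get? (⟨kw⟩ : PySem.Dict String String) "arg") with hxs
  clear hxs
  have hfst := pvRun_fst xs ["PlanName", "NewBeamSetName"] [] (by decide)
  have hlen := pvRun_len xs ["PlanName", "NewBeamSetName"] []
  have hpb := two_count_le xs
  set r := pvRun xs ["PlanName", "NewBeamSetName"] [] with hr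
  clear hr
  simp only [List.length_cons, List.length_nil] at hlen
  by_cases hP : some "PlanName" ∈ xs <;> by_cases hB : some "NewBeamSetName" ∈ xs <;>
  · first
    | (have hp1 : 0 < List.count (some "PlanName") xs := List.count_pos_iff.mpr hP)
    | (have hp1 : List.count (some "PlanName") xs = 0 := by
        rw [List.count_eq_zero]; exact hP)
    first
    | (have hb1 : 0 < List.count (some "NewBeamSetName") xs := List.count_pos_iff.mpr hB)
    | (have hb1 : List.count (some "NewBeamSetName") xs = 0 := by
        rw [List.count_eq_zero]; exact hB)
    simp [hP, hB] at hfst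
    rw [hfst] at hlen ⊢
    simp only [← List.length_eq_zero_iff]
    simp only [List.length_cons, List.length_nil] at hlen ⊢
    split_ifs <;> first | rfl | omega | tauto
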